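-- pv_equiv track=rewrite | github.com/hyun0177/codingtest | Programmers/JadenCase 문자열 만들기.py | solution
-- ===== SOURCE A (Python) =====
-- def solution(s):
--
--     s = s.lower().split(' ')
--     ans = []
--
--     for word in s:
--         if word:
--             ans.append(word.capitalize())
--         else:
--             ans.append(word)
--
--     return ' '.join(ans)
-- ===== SOURCE B (Python) =====
-- def solution(s):
--     t = s.lower()
--     out = []
--     at_word_start = True
--     for c in t:
--         if c == ' ':
--             out.append(c)
--             at_word_start = True
--         else:
--             out.append(c.capitalize() if at_word_start else c)
--             at_word_start = False
--     return ''.join(out)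
-- ===== Notes on version B (the rewrite author's own statement) =====
-- stated objective: simpler
-- what changed: Replaces the lower/split/capitalize-each-word/join pipeline by a single left-to-right pass over the lowered string with an at_word_start flag, building the output char by char with no word list.
import Mathlib
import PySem

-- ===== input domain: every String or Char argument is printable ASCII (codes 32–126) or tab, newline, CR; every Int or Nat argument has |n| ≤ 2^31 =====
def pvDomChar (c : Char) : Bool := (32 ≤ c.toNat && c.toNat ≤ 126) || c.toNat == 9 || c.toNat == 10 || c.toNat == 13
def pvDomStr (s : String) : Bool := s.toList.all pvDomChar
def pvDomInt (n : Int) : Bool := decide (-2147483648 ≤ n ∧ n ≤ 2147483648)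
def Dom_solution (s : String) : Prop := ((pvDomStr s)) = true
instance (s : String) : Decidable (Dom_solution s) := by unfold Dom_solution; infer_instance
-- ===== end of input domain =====

-- B replaces A's lower/split/capitalize/join pipeline by a single pass over the
-- lowered string with an at-word-start flag (objective: simpler).


-- ===== PORT A =====
-- word.capitalize(): first char titlecased, rest lowered — exact on the ASCII domain
def pyCapitalize (w : List Char) : List Char :=
  match w with
  | [] => []
  | c :: rest => PySem.Chars.upperChar c :: PySem.Chars.lower rest

def solution (s : String) : String :=
  let t := PySem.Chars.lower s.toList
  let words := PySem.Chars.splitOn t [' ']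
  let ans := words.foldl (fun acc w =>
    if w ≠ [] then acc ++ [pyCapitalize w] else acc ++ [w]) []
  String.mk (PySem.Chars.join [' '] ans)

-- ===== PORT B =====
def solution_alt (s : String) : String :=
  let t := PySem.Chars.lower s.toList
  let r := t.foldl (fun (st : List Char × Bool) c =>
    if c = ' ' then (st.1 ++ [' '], true)
    else (st.1 ++ [if st.2 then PySem.Chars.upperChar c else c], false)) ([], true)
  String.mk r.1

-- ===== PRECONDITION & SPEC =====
def Spec_solution (s : String) (out : String) : Prop := out = solution_alt s
instance (s : String) (out : String) : Decidable (Spec_solution s out) := by unfold Spec_solution; infer_instance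

-- ===== CLAIM (what is proved, stated in full; the proofs are below) =====
def Claim_equal_solution : Prop := ∀ (s : String), Dom_solution s → Spec_solution s (solution s)

-- ===== LEMMAS AND PROOFS =====

-- clean recursive picture of split-on-single-space
def modH (p : List Char) : List (List Char) → List (List Char)
  | [] => [p]
  | w :: ws => (p ++ w) :: ws

def splitSp : List Char → List (List Char)
  | [] => [[]]
  | c :: r => if c = ' ' then [] :: splitSp r else modH [c] (splitSp r)

theorem splitSp_ne_nil (l : List Char) : splitSp l ≠ [] := by
  cases l with
  | nil => simp [splitSp]
  | cons c r =>
    simp only [splitSp]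
    split
    · simp
    · cases h : splitSp r <;> simp [modH]

theorem modH_modH (p : List Char) (c : Char) (ws : List (List Char)) :
    modH p (modH [c] ws) = modH (p ++ [c]) ws := by
  cases ws <;> simp [modH]

theorem go_spec (fuel : Nat) (l : List Char) (h : l.length ≤ fuel)
    (cur : List Char) (acc : List (List Char)) :
    PySem.Chars.splitOn.go [' '] fuel l cur acc
      = acc.reverse ++ modH cur.reverse (splitSp l) := by
  induction fuel generalizing l cur acc with
  | zero =>
    have : l = [] := by cases l <;> simp_all
    subst this
    simp [PySem.Chars.splitOn.go, splitSp, modH]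
  | succ f ih =>
    cases l with
    | nil => simp [PySem.Chars.splitOn.go, splitSp, modH]
    | cons c rest =>
      rw [PySem.Chars.splitOn.go]
      by_cases hc : c = ' '
      · subst hc
        have hp : [' '].isPrefixOf (' ' :: rest) = true := by simp [List.isPrefixOf]
        simp only [hp, if_pos, List.length_cons, List.drop_succ_cons, List.length_nil, List.drop_zero]
        rw [ih rest (by simp at h; omega)]
        cases hs : splitSp rest with
        | nil => exact absurd hs (splitSp_ne_nil rest)
        | cons w ws => simp [splitSp, modH, hs]
      · have hp : [' '].isPrefixOf (c :: rest) = false := by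
          simp [List.isPrefixOf]
          exact fun h' => hc h'.symm
        simp only [hp, Bool.false_eq_true, if_neg, not_false_iff]
        rw [ih rest (by simp at h; omega)]
        simp [splitSp, hc, modH_modH]

theorem splitOn_eq_splitSp (l : List Char) :
    PySem.Chars.splitOn l [' '] = splitSp l := by
  rw [PySem.Chars.splitOn, go_spec (l.length + 1) l (by omega)]
  cases h : splitSp l with
  | nil => exact absurd h (splitSp_ne_nil l)
  | cons w ws => simp [modH]

-- every char of every piece of splitSp l is a char of l
theorem mem_splitSp (l : List Char) (w : List Char) (hw : w ∈ splitSp l)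
    (c : Char) (hc : c ∈ w) : c ∈ l := by
  induction l generalizing w with
  | nil =>
    simp [splitSp] at hw
    subst hw; simp at hc
  | cons d r ih =>
    simp only [splitSp] at hw
    by_cases hd : d = ' '
    · simp [hd] at hw
      rcases hw with hw | hw
      · subst hw; simp at hc
      · exact List.mem_cons_of_mem _ (ih w hw hc)
    · simp only [hd, if_neg, not_false_iff] at hw
      cases hs : splitSp r with
      | nil => exact absurd hs (splitSp_ne_nil r)
      | cons v vs =>
        rw [hs] at hw
        simp [modH] at hw
        rcases hw with hw | hw
        · subst hw
          rcases List.mem_cons.mp hc with hc | hc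
          · simp [hc]
          · exact List.mem_cons_of_mem _ (ih v (by simp [hs]) hc)
        · exact List.mem_cons_of_mem _ (ih w (by simp [hs, hw]) hc)

-- single-pass picture of B
def jaden : Bool → List Char → List Char
  | _, [] => []
  | b, c :: r =>
    if c = ' ' then ' ' :: jaden true r
    else (if b then PySem.Chars.upperChar c else c) :: jaden false r

def joinTail (ws : List (List Char)) : List Char :=
  (ws.map (fun w => ' ' :: pyCapitalize w)).flatten

theorem lowerChar_idem (c : Char) :
    PySem.Chars.lowerChar (PySem.Chars.lowerChar c) = PySem.Chars.lowerChar c := by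
  unfold PySem.Chars.lowerChar PySem.Chars.isupper
  by_cases h : ('A' ≤ c ∧ c ≤ 'Z')
  · have h1 : (65:Nat) ≤ c.toNat := h.1
    have h2 : c.toNat ≤ 90 := h.2
    have hv : (c.toNat + 32).isValidChar := Or.inl (by omega)
    have ht : (Char.ofNat (c.toNat + 32)).toNat = c.toNat + 32 := by
      rw [Char.toNat_ofNat]; simp [hv]
    have hA : ¬ ('A' ≤ Char.ofNat (c.toNat + 32) ∧ Char.ofNat (c.toNat + 32) ≤ 'Z') := by
      rintro ⟨-, hh⟩
      have : (Char.ofNat (c.toNat + 32)).toNat ≤ ('Z' : Char).toNat := hh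
      rw [ht] at this
      simp at this; omega
    simp only [h.1, h.2, decide_true, Bool.and_self, if_pos]
    rw [if_neg]
    intro hh
    exact hA ⟨of_decide_eq_true (Bool.and_eq_true_iff.mp hh).1,
      of_decide_eq_true (Bool.and_eq_true_iff.mp hh).2⟩
  · have hd : ¬ (decide ('A' ≤ c) && decide (c ≤ 'Z')) = true := by
      simp only [Bool.and_eq_true, decide_eq_true_eq]; exact h
    rw [if_neg hd, if_neg hd]

theorem lower_fixed {l : List Char} (h : ∀ c ∈ l, PySem.Chars.lowerChar c = c) :
    PySem.Chars.lower l = l := by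
  unfold PySem.Chars.lower
  exact (List.map_congr_left h).trans (List.map_id _)

-- main bridge: A's join∘map-capitalize∘split equals B's single pass, on lower-fixed input
theorem bridge (l : List Char) (h : ∀ c ∈ l, PySem.Chars.lowerChar c = c) :
    pyCapitalize (splitSp l).headI ++ joinTail (splitSp l).tail = jaden true l
    ∧ (splitSp l).headI ++ joinTail (splitSp l).tail = jaden false l := by
  induction l with
  | nil => simp [splitSp, pyCapitalize, joinTail, jaden]
  | cons c r ih =>
    have hr : ∀ d ∈ r, PySem.Chars.lowerChar d = d :=
      fun d hd => h d (List.mem_cons_of_mem _ hd)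
    obtain ⟨ih1, ih2⟩ := ih hr
    cases hs : splitSp r with
    | nil => exact absurd hs (splitSp_ne_nil r)
    | cons w ws =>
      rw [hs] at ih1 ih2
      simp only [List.headI, List.tail] at ih1 ih2
      by_cases hc : c = ' '
      · subst hc
        have e1 : splitSp (' ' :: r) = [] :: w :: ws := by simp [splitSp, hs]
        rw [e1]
        have hj : ∀ b, jaden b (' ' :: r) = ' ' :: jaden true r := by
          intro b; rw [jaden]; simp
        constructor <;>
        · rw [hj]
          show ' ' :: (pyCapitalize w ++ joinTail ws) = _
          rw [ih1]
      · have e1 : splitSp (c :: r) = (c :: w) :: ws := by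
          simp [splitSp, hc, hs, modH]
        rw [e1]
        have hwl : PySem.Chars.lower w = w := by
          apply lower_fixed
          intro d hd
          exact hr d (mem_splitSp r w (by simp [hs]) d hd)
        have hj : ∀ b, jaden b (c :: r)
            = (if b then PySem.Chars.upperChar c else c) :: jaden false r := by
          intro b; rw [jaden]; simp [hc]
        constructor
        · rw [hj]
          show PySem.Chars.upperChar c :: (PySem.Chars.lower w ++ joinTail ws) = _
          rw [hwl, ih2]; simp
        · rw [hj]
          show c :: (w ++ joinTail ws) = _
          rw [ih2]; simp

theorem join_eq (x : List Char) (xs : List (List Char)) :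
    PySem.Chars.join [' '] (x :: xs) = x ++ (xs.map (fun w => ' ' :: w)).flatten := by
  induction xs generalizing x with
  | nil => simp [PySem.Chars.join, List.intercalate]
  | cons y ys ih =>
    simp only [PySem.Chars.join] at ih ⊢
    have step : List.intercalate [' '] (x :: y :: ys)
        = x ++ [' '] ++ List.intercalate [' '] (y :: ys) := by
      simp [List.intercalate, List.intersperse]
    rw [step, ih y]
    simp

theorem foldlB (l : List Char) (acc : List Char) (b : Bool) :
    (l.foldl (fun (st : List Char × Bool) c =>
      if c = ' ' then (st.1 ++ [' '], true)
      else (st.1 ++ [if st.2 then PySem.Chars.upperChar c else c], false)) (acc, b)).1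
    = acc ++ jaden b l := by
  induction l generalizing acc b with
  | nil => simp [jaden]
  | cons c r ih =>
    by_cases hc : c = ' '
    · subst hc; simp [List.foldl, ih, jaden]
    · simp only [List.foldl, hc, if_neg, not_false_iff]
      rw [ih]
      cases b <;> simp [jaden, hc]

theorem foldlA (ws : List (List Char)) (acc : List (List Char)) :
    ws.foldl (fun acc w => if w ≠ [] then acc ++ [pyCapitalize w] else acc ++ [w]) acc
    = acc ++ ws.map pyCapitalize := by
  induction ws generalizing acc with
  | nil => simp
  | cons w t ih =>
    have hw : (if w ≠ [] then acc ++ [pyCapitalize w] else acc ++ [w])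
        = acc ++ [pyCapitalize w] := by
      cases w <;> simp [pyCapitalize]
    rw [List.foldl_cons, hw, ih]
    simp

-- ===== VERDICT (by name: the statement is the Claim_ definition above) =====
theorem solution_spec : Claim_equal_solution := by
  intro s _
  unfold Spec_solution solution solution_alt
  dsimp only
  have hfix : ∀ c ∈ PySem.Chars.lower s.toList, PySem.Chars.lowerChar c = c := by
    intro c hc
    simp only [PySem.Chars.lower, List.mem_map] at hc
    obtain ⟨d, -, rfl⟩ := hc
    exact lowerChar_idem d
  rw [splitOn_eq_splitSp, foldlA, foldlB, List.nil_append, List.nil_append]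
  obtain ⟨b1, -⟩ := bridge (PySem.Chars.lower s.toList) hfix
  cases hs : splitSp (PySem.Chars.lower s.toList) with
  | nil => exact absurd hs (splitSp_ne_nil _)
  | cons w ws =>
    rw [hs] at b1
    simp only [List.headI, List.tail] at b1
    rw [List.map_cons, join_eq]
    congr 1
    rw [← b1]
    simp [joinTail, List.map_map]
    rfl
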